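-- pv_equiv track=rewrite | github.com/Swiddis/Joseki-Scraper | joseki_scrape.py | dereflect
-- ===== SOURCE A (Python) =====
-- def dereflect(sequence):
--     if sequence[0][:2] == [9, 9]:
--         if len(sequence) == 1: return [[9, 9, "b"]]
--         while sequence[1][0] > 9 or sequence[1][1] > 9:
--             sequence = [[m[1], 18-m[0], m[2]] for m in sequence]
--     else:
--         while sequence[0][0] > 9 or sequence[0][1] > 9:
--             sequence = [[m[1], 18-m[0], m[2]] for m in sequence]
--     for m in sequence:
--         if m[0] > m[1]:
--             sequence = [[m[1], m[0], m[2]] for m in sequence]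
--             break
--         if m[1] > m[0]:
--             break
--     if sequence[0][2] == "w":
--         sequence = [[m[0], m[1], "w" if m[2] == "b" else "b"] for m in sequence]
--     return [[m[0] + 1, m[1] + 1, m[2]] for m in sequence]
-- ===== SOURCE B (Python) =====
-- def dereflect(sequence):
--     x0, y0, c0 = sequence[0][0], sequence[0][1], sequence[0][2]
--     center = x0 == 9 and y0 == 9
--     if center and len(sequence) == 1:
--         return [[9, 9, "b"]]
--     rx, ry = (sequence[1][0], sequence[1][1]) if center else (x0, y0)
--     if rx <= 9 and ry <= 9:
--         pts = [(m[0], m[1]) for m in sequence]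
--     elif ry <= 9:
--         pts = [(m[1], 18 - m[0]) for m in sequence]
--     elif rx >= 9:
--         pts = [(18 - m[0], 18 - m[1]) for m in sequence]
--     else:
--         pts = [(18 - m[1], m[0]) for m in sequence]
--     swap = next((a > b for a, b in pts if a != b), False)
--     flip = c0 == "w"
--     out = []
--     for (a, b), m in zip(pts, sequence):
--         if swap:
--             a, b = b, a
--         c = m[2]
--         if flip:
--             c = "w" if c == "b" else "b"
--         out.append([a + 1, b + 1, c])
--     return out
-- ===== Notes on version B (the rewrite author's own statement) =====
-- stated objective: alternative
-- what changed: Replaces A's repeated whole-sequence rotation loops by a closed-form choice of the rotation from the reference move's quadrant (one map instead of up to three), computes the reflection flag by a single scan over the precomputed coordinates, and fuses reflection, color flip and the +1 offset into one final pass over zip(pts, sequence).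
import Mathlib
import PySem

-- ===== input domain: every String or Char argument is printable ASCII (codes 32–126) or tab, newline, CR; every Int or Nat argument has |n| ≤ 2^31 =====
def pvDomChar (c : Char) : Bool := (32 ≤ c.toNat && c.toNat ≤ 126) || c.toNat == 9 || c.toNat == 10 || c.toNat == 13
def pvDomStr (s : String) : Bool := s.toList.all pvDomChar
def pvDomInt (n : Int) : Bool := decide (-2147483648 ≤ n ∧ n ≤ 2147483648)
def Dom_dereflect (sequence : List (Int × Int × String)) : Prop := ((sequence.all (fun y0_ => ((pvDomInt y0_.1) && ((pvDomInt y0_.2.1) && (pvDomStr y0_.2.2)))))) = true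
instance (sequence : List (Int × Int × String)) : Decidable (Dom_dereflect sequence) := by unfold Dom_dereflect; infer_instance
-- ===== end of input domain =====

-- B replaces A's repeated rotate-whole-sequence loops by a closed-form rotation chosen
-- from the reference move's quadrant, and fuses reflection/color-flip/+1 into one pass.
-- Equivalence of return values is claimed for nonempty input (A raises IndexError on []).

-- ===== PORT A =====
-- [[m[1], 18-m[0], m[2]] for m in sequence]
def pvRotOnce (s : List (Int × Int × String)) : List (Int × Int × String) :=
  s.map (fun m => (m.2.1, 18 - m.1, m.2.2))

-- 'while sequence[i][0] > 9 or sequence[i][1] > 9: sequence = rotate(sequence)'.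
-- Fuel 4 only makes the loop total: for every reference move some rotation count
-- k ∈ {0,1,2,3} satisfies the exit condition (proved in pvWhileRot_four below),
-- so the fuel is never exhausted when s[i] exists.
def pvWhileRot (i : Nat) : Nat → List (Int × Int × String) → List (Int × Int × String)
  | 0, s => s
  | fuel+1, s =>
    match s[i]? with
    | some m => if m.1 > 9 ∨ m.2.1 > 9 then pvWhileRot i fuel (pvRotOnce s) else s
    | none => s   -- Python raises IndexError here; excluded by Pre_

-- 'for m in sequence: if m[0] > m[1]: … break  / if m[1] > m[0]: break'
def pvReflectScan : List (Int × Int × String) → List (Int × Int × String) → List (Int × Int × String)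
  | [], s => s
  | m :: rest, s =>
    if m.1 > m.2.1 then s.map (fun n => (n.2.1, n.1, n.2.2))
    else if m.2.1 > m.1 then s
    else pvReflectScan rest s

-- the common tail of A: reflection scan, color flip, +1 offset
def pvFinish (s : List (Int × Int × String)) : List (Int × Int × String) :=
  let s1 := pvReflectScan s s
  let s2 := if (s1.headD (0, 0, "")).2.2 = "w"
            then s1.map (fun m => (m.1, m.2.1, if m.2.2 = "b" then "w" else "b"))
            else s1
  s2.map (fun m => (m.1 + 1, m.2.1 + 1, m.2.2))

def dereflect (sequence : List (Int × Int × String)) : List (Int × Int × String) :=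
  match sequence with
  | [] => []   -- Python raises IndexError here; excluded by Pre_
  | m0 :: _ =>
    if m0.1 = 9 ∧ m0.2.1 = 9 then
      if sequence.length = 1 then [(9, 9, "b")]
      else pvFinish (pvWhileRot 1 4 sequence)
    else pvFinish (pvWhileRot 0 4 sequence)

-- ===== PORT B =====
-- next((a > b for a, b in pts if a != b), False)
def pvFirstSwap : List (Int × Int) → Bool
  | [] => false
  | p :: rest => if p.1 ≠ p.2 then decide (p.1 > p.2) else pvFirstSwap rest

-- the final for-loop over zip(pts, sequence) with its append accumulator
def pvBuild (pts : List (Int × Int)) (seq : List (Int × Int × String))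
    (swap flip : Bool) : List (Int × Int × String) :=
  (pts.zip seq).map (fun pm =>
    ((if swap then pm.1.2 else pm.1.1) + 1,
     (if swap then pm.1.1 else pm.1.2) + 1,
     if flip then (if pm.2.2.2 = "b" then "w" else "b") else pm.2.2.2))

def dereflect_alt (sequence : List (Int × Int × String)) : List (Int × Int × String) :=
  match sequence with
  | [] => []   -- Python raises IndexError here; excluded by Pre_
  | m0 :: tail =>
    let center : Bool := m0.1 == 9 && m0.2.1 == 9
    if center && (sequence.length == 1) then [(9, 9, "b")]
    else
      let r := if center then tail.headD (0, 0, "") else m0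
      let pts :=
        if r.1 ≤ 9 ∧ r.2.1 ≤ 9 then sequence.map (fun m => (m.1, m.2.1))
        else if r.2.1 ≤ 9 then sequence.map (fun m => (m.2.1, 18 - m.1))
        else if r.1 ≥ 9 then sequence.map (fun m => (18 - m.1, 18 - m.2.1))
        else sequence.map (fun m => (18 - m.2.1, m.1))
      pvBuild pts sequence (pvFirstSwap pts) (m0.2.2 == "w")

-- ===== PRECONDITION & SPEC =====
-- Pre_ excludes only the empty list, on which Python A raises IndexError.
def Pre_dereflect (sequence : List (Int × Int × String)) : Prop := sequence ≠ []
instance (sequence : List (Int × Int × String)) : Decidable (Pre_dereflect sequence) := by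
  unfold Pre_dereflect; infer_instance

def pvWitness_dereflect : (List (Int × Int × String)) := [(3, 14, "b"), (16, 4, "w")]

def Spec_dereflect (sequence : List (Int × Int × String)) (out : List (Int × Int × String)) : Prop := out = dereflect_alt sequence
instance (sequence : List (Int × Int × String)) (out : List (Int × Int × String)) : Decidable (Spec_dereflect sequence out) := by unfold Spec_dereflect; infer_instance

-- ===== CLAIM (what is proved, stated in full; the proofs are below) =====
def Claim_equal_dereflect : Prop := ∀ (sequence : List (Int × Int × String)), Dom_dereflect sequence → Pre_dereflect sequence → Spec_dereflect sequence (dereflect sequence)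

-- ===== LEMMAS AND PROOFS =====

-- A's rotation loop computes the closed-form rotation selected by the quadrant of s[i].
theorem pvWhileRot_four (i : Nat) (s : List (Int × Int × String)) (x y : Int) (c : String)
    (h : s[i]? = some (x, y, c)) :
    pvWhileRot i 4 s =
      if x ≤ 9 ∧ y ≤ 9 then s
      else if y ≤ 9 then s.map (fun m => (m.2.1, 18 - m.1, m.2.2))
      else if x ≥ 9 then s.map (fun m => (18 - m.1, 18 - m.2.1, m.2.2))
      else s.map (fun m => (18 - m.2.1, m.1, m.2.2)) := by
  by_cases h1 : x ≤ 9 ∧ y ≤ 9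
  · have hc : ¬ (x > 9 ∨ y > 9) := by omega
    simp [pvWhileRot, h, hc, h1]
  · by_cases h2 : y ≤ 9
    · have hx : x > 9 := by omega
      have c1 : x > 9 ∨ y > 9 := Or.inl hx
      have c2 : ¬ (y > 9 ∨ 18 - x > 9) := by omega
      have hx9 : ¬ x ≤ 9 := by omega
      simp [pvWhileRot, pvRotOnce, h, List.getElem?_map, c1, c2, hx9, h2]
    · by_cases h3 : x ≥ 9
      · have c1 : x > 9 ∨ y > 9 := Or.inr (by omega)
        have c2 : y > 9 ∨ 18 - x > 9 := Or.inl (by omega)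
        have c3 : ¬ (18 - x > 9 ∨ 18 - y > 9) := by omega
        simp [pvWhileRot, pvRotOnce, h, List.getElem?_map, c1, c2, c3, h2, h3,
              List.map_map, Function.comp]
      · have c1 : x > 9 ∨ y > 9 := Or.inr (by omega)
        have c2 : y > 9 ∨ 18 - x > 9 := Or.inl (by omega)
        have c3 : 18 - x > 9 ∨ 18 - y > 9 := Or.inl (by omega)
        have c4' : ¬ (18 - y > 9 ∨ x > 9) := by omega
        simp [pvWhileRot, pvRotOnce, h, List.getElem?_map, c1, c2, c3, c4', h2, h3,
              List.map_map, Function.comp, sub_sub_cancel]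

-- A's reflection scan of t equals B's boolean over t's coordinates.
theorem pvReflectScan_eq (t s : List (Int × Int × String)) :
    pvReflectScan t s =
      if pvFirstSwap (t.map (fun m => (m.1, m.2.1))) then s.map (fun n => (n.2.1, n.1, n.2.2))
      else s := by
  induction t with
  | nil => simp [pvReflectScan, pvFirstSwap]
  | cons m rest ih =>
    rcases lt_trichotomy m.1 m.2.1 with hlt | heq | hgt
    · have h1 : ¬ m.1 > m.2.1 := by omega
      have h2 : m.1 ≠ m.2.1 := by omega
      have h3 : ¬ m.2.1 ≤ m.1 := by omega
      simp [pvReflectScan, pvFirstSwap, h1, h2, h3]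
    · have h1 : ¬ m.1 > m.2.1 := by omega
      simp [pvReflectScan, pvFirstSwap, heq, ih]
    · have h1 : m.1 ≠ m.2.1 := by omega
      simp [pvReflectScan, pvFirstSwap, hgt, h1]

-- A's common tail on a rotated list equals B's fused final pass.
theorem pvFinish_eq_build (m0 : Int × Int × String) (tail : List (Int × Int × String))
    (g : Int × Int × String → Int × Int) :
    pvFinish ((m0 :: tail).map (fun m => ((g m).1, (g m).2, m.2.2)))
      = pvBuild ((m0 :: tail).map g) (m0 :: tail)
          (pvFirstSwap ((m0 :: tail).map g)) (m0.2.2 == "w") := by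
  have hz : ((m0 :: tail).map g).zip (m0 :: tail)
      = (m0 :: tail).map (fun m => (g m, m)) := by
    calc ((m0 :: tail).map g).zip (m0 :: tail)
        = ((m0 :: tail).map g).zip ((m0 :: tail).map id) := by rw [List.map_id]
      _ = (m0 :: tail).map (fun m => (g m, m)) := by
            simpa using (List.zip_map' (f := g) (g := id) (l := m0 :: tail))
  have hpts : (((m0 :: tail).map (fun m => ((g m).1, (g m).2, m.2.2))).map
      (fun m => (m.1, m.2.1))) = (m0 :: tail).map g := by
    simp [List.map_map]
  simp only [pvFinish, pvReflectScan_eq, hpts, pvBuild, hz]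
  cases hb : pvFirstSwap ((m0 :: tail).map g) <;>
    by_cases hf : m0.2.2 = "w" <;>
      simp [hf, List.map_map, List.map_cons]

-- the bridge: A's whole pipeline after the special case equals B's pipeline, for reference s[i].
theorem pvBridge (m0 : Int × Int × String) (tail : List (Int × Int × String))
    (r : Int × Int × String) (i : Nat) (hi : (m0 :: tail)[i]? = some r) :
    pvFinish (pvWhileRot i 4 (m0 :: tail)) =
      (let pts :=
        if r.1 ≤ 9 ∧ r.2.1 ≤ 9 then (m0 :: tail).map (fun m => (m.1, m.2.1))
        else if r.2.1 ≤ 9 then (m0 :: tail).map (fun m => (m.2.1, 18 - m.1))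
        else if r.1 ≥ 9 then (m0 :: tail).map (fun m => (18 - m.1, 18 - m.2.1))
        else (m0 :: tail).map (fun m => (18 - m.2.1, m.1));
       pvBuild pts (m0 :: tail) (pvFirstSwap pts) (m0.2.2 == "w")) := by
  rw [pvWhileRot_four i (m0 :: tail) r.1 r.2.1 r.2.2 (by simpa using hi)]
  split_ifs with h1 h2 h3
  · have hid : (m0 :: tail) = (m0 :: tail).map
        (fun m => ((m.1 : Int), (m.2.1 : Int), m.2.2)) := by simp
    conv_lhs => rw [hid]
    exact pvFinish_eq_build m0 tail (fun m => (m.1, m.2.1))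
  · exact pvFinish_eq_build m0 tail (fun m => (m.2.1, 18 - m.1))
  · exact pvFinish_eq_build m0 tail (fun m => (18 - m.1, 18 - m.2.1))
  · exact pvFinish_eq_build m0 tail (fun m => (18 - m.2.1, m.1))

-- ===== VERDICT (by name: the statement is the Claim_ definition above) =====
theorem dereflect_spec : Claim_equal_dereflect := by
  intro seq _ hpre
  unfold Spec_dereflect
  match seq with
  | [] => exact absurd rfl hpre
  | m0 :: tail =>
    by_cases hc : m0.1 = 9 ∧ m0.2.1 = 9
    · have hcb : (m0.1 == 9 && m0.2.1 == 9) = true := by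
        simp [hc.1, hc.2]
      match tail with
      | [] => simp [dereflect, dereflect_alt, hc]
      | r1 :: t2 =>
        have hlen : (m0 :: r1 :: t2).length ≠ 1 := by simp
        have hi : (m0 :: r1 :: t2)[1]? = some r1 := rfl
        simp only [dereflect, dereflect_alt, hc, hlen, Bool.and_eq_true, beq_iff_eq,
          List.headD_cons, ite_false]
        rw [pvBridge m0 (r1 :: t2) r1 1 hi]
        simp
    · have hcb : (m0.1 == 9 && m0.2.1 == 9) = false := by
        rcases not_and_or.mp hc with h | h <;> simp [h]
      have hi : (m0 :: tail)[0]? = some m0 := rfl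
      simp only [dereflect, dereflect_alt, hc, hcb, Bool.false_and,
        Bool.false_eq_true, ite_false]
      rw [pvBridge m0 tail m0 0 hi]
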